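-- pv_equiv track=rewrite | github.com/Manmade9416/MuOrg | muorg/tags.py | clean_artist_name
-- ===== SOURCE A (Python) =====
-- def clean_artist_name(artist: str) -> str:
--     """
--     Return a single-artist name from a tag that may contain multiple artists.
--
--     Recognises common separators (semicolon, comma, slash, ampersand,
--     pipe, and the word "and"). The first non-empty element after splitting
--     is returned, trimmed of surrounding whitespace.
--     """
--     if not artist:
--         return artist
--
--     separators = [";", ",", "/", "&", "|", " and "]
--     normalized = artist
--     for sep in separators:
--         normalized = normalized.replace(sep, ";")
--
--     for part in normalized.split(";"):
--         part = part.strip()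
--         if part:
--             return part
--
--     return artist.strip()
-- ===== SOURCE B (Python) =====
-- def clean_artist_name(artist: str) -> str:
--     """
--     Return a single-artist name from a tag that may contain multiple artists.
--
--     Single left-to-right scan: accumulate the current token and emit the
--     first one that is non-empty after stripping, cutting at any of the
--     separators ; , / & | or the word " and ".
--     """
--     if not artist:
--         return artist
--
--     token = []
--     i = 0
--     n = len(artist)
--     while i < n:
--         if artist.startswith(" and ", i):
--             part = "".join(token).strip()
--             if part:
--                 return part
--             token = []
--             i += 5
--         elif artist[i] in ";,/&|":
--             part = "".join(token).strip()
--             if part: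
--                 return part
--             token = []
--             i += 1
--         else:
--             token.append(artist[i])
--             i += 1
--
--     part = "".join(token).strip()
--     if part:
--         return part
--     return artist.strip()
-- ===== Notes on version B (the rewrite author's own statement) =====
-- stated objective: alternative
-- what changed: A builds a normalized copy of the string by six sequential replace passes and then splits the copy to scan its parts; B makes a single left-to-right pass over the original characters, cutting at each separator and returning the first token that is non-empty after stripping, with no intermediate strings or part list.
import Mathlib
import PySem

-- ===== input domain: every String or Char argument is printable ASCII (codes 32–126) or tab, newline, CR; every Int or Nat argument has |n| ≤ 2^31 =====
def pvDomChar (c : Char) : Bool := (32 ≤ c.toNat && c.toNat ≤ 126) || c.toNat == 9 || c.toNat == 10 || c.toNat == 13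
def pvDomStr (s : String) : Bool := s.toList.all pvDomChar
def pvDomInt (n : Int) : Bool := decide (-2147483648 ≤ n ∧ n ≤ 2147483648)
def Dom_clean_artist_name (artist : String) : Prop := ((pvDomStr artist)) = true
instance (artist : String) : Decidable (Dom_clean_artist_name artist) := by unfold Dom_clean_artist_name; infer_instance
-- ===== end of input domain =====

-- B replaces A's normalize-then-split pipeline by a single left-to-right scan that
-- emits the first non-empty token (objective: alternative, one pass, no intermediate strings).


-- ===== PORT A =====
-- A's final for-loop over the parts of normalized.split(";"): first part that is
-- non-empty after stripping, else the fallback artist.strip().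
def firstA (parts : List (List Char)) (fb : List Char) : List Char :=
  match parts with
  | [] => fb
  | p :: ps =>
    if PySem.Chars.strip p = [] then firstA ps fb else PySem.Chars.strip p

def clean_artist_name (artist : String) : String :=
  if artist = "" then artist
  else
    let seps : List (List Char) := [[';'], [','], ['/'], ['&'], ['|'], [' ', 'a', 'n', 'd', ' ']]
    let normalized := seps.foldl (fun s sep => PySem.Chars.replace s sep [';']) artist.toList
    String.ofList (firstA (PySem.Chars.splitOn normalized [';']) (PySem.Chars.strip artist.toList))

-- ===== PORT B =====
-- B's while-loop: one pass over the characters, `tok` is the current token (reversed),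
-- `fb` the precomputed fallback artist.strip().
def scanB (fb : List Char) : List Char → List Char → List Char
  | [], tok =>
    if PySem.Chars.strip tok.reverse = [] then fb else PySem.Chars.strip tok.reverse
  | c :: rest, tok =>
    if [' ', 'a', 'n', 'd', ' '].isPrefixOf (c :: rest) then
      if PySem.Chars.strip tok.reverse = [] then scanB fb (rest.drop 4) []
      else PySem.Chars.strip tok.reverse
    else if c = ';' ∨ c = ',' ∨ c = '/' ∨ c = '&' ∨ c = '|' then
      if PySem.Chars.strip tok.reverse = [] then scanB fb rest []
      else PySem.Chars.strip tok.reverse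
    else scanB fb rest (c :: tok)
termination_by l _ => l.length
decreasing_by
  all_goals simp

def clean_artist_name_alt (artist : String) : String :=
  if artist = "" then artist
  else String.ofList (scanB (PySem.Chars.strip artist.toList) artist.toList [])

-- ===== PRECONDITION & SPEC =====
def Spec_clean_artist_name (artist : String) (out : String) : Prop := out = clean_artist_name_alt artist
instance (artist : String) (out : String) : Decidable (Spec_clean_artist_name artist out) := by unfold Spec_clean_artist_name; infer_instance

-- ===== CLAIM (what is proved, stated in full; the proofs are below) =====
def Claim_equal_clean_artist_name : Prop := ∀ (artist : String), Dom_clean_artist_name artist → Spec_clean_artist_name artist (clean_artist_name artist)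

-- ===== LEMMAS AND PROOFS =====

/-- The word separator " and " as a list of characters. -/
def patAnd : List Char := [' ', 'a', 'n', 'd', ' ']

/-- Is `c` one of the single-character separators? -/
def isSep (c : Char) : Bool := c = ';' || c = ',' || c = '/' || c = '&' || c = '|'

/-- Pointwise effect of A's five single-character replaces. -/
def subf (c : Char) : Char := if isSep c then ';' else c

/-- Spec of `replace s " and " ";"`: leftmost non-overlapping replacement. -/
def repAnd : List Char → List Char
  | [] => []
  | c :: rest =>
    if patAnd.isPrefixOf (c :: rest) then ';' :: repAnd (rest.drop 4)
    else c :: repAnd rest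
termination_by l => l.length
decreasing_by
  all_goals simp

/-- Spec of `split(";")`. -/
def splitSemi : List Char → List (List Char)
  | [] => [[]]
  | c :: rest =>
    if c = ';' then [] :: splitSemi rest
    else (c :: (splitSemi rest).headI) :: (splitSemi rest).tail

lemma repAnd_nil : repAnd [] = [] := by rw [repAnd.eq_def]

lemma inv_nil (l : List Char) : ∀ t₁ t₂ : List Char, t₂ ≠ [] →
    (([] : List Char)).reverse = t₁ ++ t₂ → ¬ patAnd <+: (t₂ ++ l) := by
  intro t₁ t₂ h2 he
  simp only [List.reverse_nil] at he
  exact absurd (List.append_eq_nil_iff.mp he.symm).2 h2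

lemma splitSemi_ne_nil (s : List Char) : splitSemi s ≠ [] := by
  match s with
  | [] => simp [splitSemi]
  | c :: rest =>
    unfold splitSemi
    split_ifs <;> simp

lemma replace_single (c : Char) (s acc : List Char) (fuel : Nat) (hf : s.length ≤ fuel) :
    PySem.Chars.replace.go [c] [';'] fuel s acc
      = acc.reverse ++ s.map (fun x => if x = c then ';' else x) := by
  induction fuel generalizing s acc with
  | zero =>
    have hs : s = [] := List.eq_nil_of_length_eq_zero (by omega)
    subst hs
    simp [PySem.Chars.replace.go]
  | succ n ih =>
    match s with
    | [] => simp [PySem.Chars.replace.go]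
    | x :: t =>
      rw [PySem.Chars.replace.go]
      by_cases hx : x = c
      · rw [if_pos (by simp [List.isPrefixOf, hx])]
        rw [show List.drop [c].length (x :: t) = t from rfl]
        rw [ih t _ (by simp at hf ⊢; omega)]
        simp [hx]
      · rw [if_neg (by simp [List.isPrefixOf]; exact fun h => hx h.symm)]
        rw [ih t _ (by simp at hf ⊢; omega)]
        simp [hx]

lemma replace_single' (c : Char) (s : List Char) :
    PySem.Chars.replace s [c] [';'] = s.map (fun x => if x = c then ';' else x) := by
  simp [PySem.Chars.replace, replace_single c s [] s.length le_rfl]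

lemma replace_and (s acc : List Char) (fuel : Nat) (hf : s.length ≤ fuel) :
    PySem.Chars.replace.go patAnd [';'] fuel s acc = acc.reverse ++ repAnd s := by
  induction fuel generalizing s acc with
  | zero =>
    have hs : s = [] := List.eq_nil_of_length_eq_zero (by omega)
    subst hs
    simp [PySem.Chars.replace.go, repAnd]
  | succ n ih =>
    match s with
    | [] => simp [PySem.Chars.replace.go, repAnd]
    | x :: t =>
      rw [PySem.Chars.replace.go]
      by_cases hp : patAnd.isPrefixOf (x :: t)
      · have hlen : 5 ≤ (x :: t).length := by
          have := List.IsPrefix.length_le (List.isPrefixOf_iff_prefix.mp hp)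
          simpa [patAnd] using this
        rw [if_pos (by simpa [patAnd] using hp)]
        rw [show (patAnd).length = 5 from rfl] at *
        rw [ih]
        · rw [repAnd, if_pos hp]
          simp
        · simp at hf hlen ⊢; omega
      · rw [if_neg (by simpa [patAnd] using hp)]
        rw [ih]
        · rw [repAnd, if_neg hp]; simp
        · simp at hf ⊢; omega

lemma replace_and' (s : List Char) :
    PySem.Chars.replace s patAnd [';'] = repAnd s := by
  have h := replace_and s [] s.length le_rfl
  simp only [List.reverse_nil, List.nil_append] at h
  simp only [PySem.Chars.replace]
  rw [if_neg (by decide)]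
  exact h

/-- `splitSemi` with a current partial token glued onto its first part. -/
def glue (cur : List Char) (s : List Char) : List (List Char) :=
  (cur ++ (splitSemi s).headI) :: (splitSemi s).tail

lemma glue_nil_left (s : List Char) : glue [] s = splitSemi s := by
  unfold glue
  cases hs : splitSemi s with
  | nil => exact absurd hs (splitSemi_ne_nil s)
  | cons p ps => simp

lemma glue_semi (cur t : List Char) : glue cur (';' :: t) = cur :: splitSemi t := by
  unfold glue
  rw [splitSemi, if_pos rfl]
  simp

lemma glue_cons (c : Char) (cur t : List Char) (h : ¬ c = ';') :
    glue cur (c :: t) = glue (cur ++ [c]) t := by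
  unfold glue
  rw [splitSemi, if_neg h]
  simp

lemma splitOn_go (s cur : List Char) (acc : List (List Char)) (fuel : Nat)
    (hf : s.length + 1 ≤ fuel) :
    PySem.Chars.splitOn.go [';'] fuel s cur acc = acc.reverse ++ glue cur.reverse s := by
  induction fuel generalizing s cur acc with
  | zero => omega
  | succ n ih =>
    match s with
    | [] => simp [PySem.Chars.splitOn.go, glue, splitSemi]
    | x :: t =>
      rw [PySem.Chars.splitOn.go]
      by_cases hx : x = ';'
      · rw [if_pos (by simp [hx, List.isPrefixOf])]
        rw [show List.drop [';'].length (x :: t) = t from rfl]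
        rw [ih t [] (cur.reverse :: acc) (by simp at hf ⊢; omega)]
        simp [hx, glue_semi, glue_nil_left]
      · rw [if_neg (by simp [List.isPrefixOf]; exact fun h => hx h.symm)]
        rw [ih t (x :: cur) acc (by simp at hf ⊢; omega)]
        rw [glue_cons x cur.reverse t hx]
        simp

lemma splitOn_eq (s : List Char) : PySem.Chars.splitOn s [';'] = splitSemi s := by
  rw [PySem.Chars.splitOn, splitOn_go s [] [] (s.length + 1) le_rfl]
  simp [glue_nil_left]

lemma subf_eq_iff {c p : Char} (hp : isSep p = false) : subf c = p ↔ c = p := by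
  unfold subf
  split_ifs with h
  · constructor
    · intro he; rw [← he] at hp; simp [isSep] at hp
    · intro he; rw [he] at h; rw [h] at hp; exact absurd hp (by simp)
  · exact Iff.rfl

lemma eq_subf_iff {c p : Char} (hp : isSep p = false) : p = subf c ↔ p = c := by
  rw [eq_comm, subf_eq_iff hp, eq_comm]

/-- Occurrences of " and " are unchanged by the single-char substitution. -/
lemma pat_prefix_map (x : List Char) : patAnd <+: x.map subf ↔ patAnd <+: x := by
  have hsp : isSep ' ' = false := by decide
  have hsa : isSep 'a' = false := by decide
  have hsn : isSep 'n' = false := by decide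
  have hsd : isSep 'd' = false := by decide
  match x with
  | [] => simp [patAnd]
  | [c1] => simp [patAnd]
  | [c1, c2] => simp [patAnd]
  | [c1, c2, c3] => simp [patAnd]
  | [c1, c2, c3, c4] => simp [patAnd]
  | c1 :: c2 :: c3 :: c4 :: c5 :: rest =>
    simp only [List.map_cons, patAnd, List.cons_prefix_cons, List.nil_prefix, and_true]
    rw [eq_subf_iff hsp, eq_subf_iff hsa, eq_subf_iff hsn, eq_subf_iff hsd, eq_subf_iff hsp]

lemma splitSemi_no_semi {a : List Char} (h : ∀ c ∈ a, c ≠ ';') : splitSemi a = [a] := by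
  induction a with
  | nil => rfl
  | cons c a' ih =>
    rw [splitSemi, if_neg (h c (by simp))]
    rw [ih (fun x hx => h x (by simp [hx]))]
    simp

lemma splitSemi_append_semi {a : List Char} (b : List Char) (h : ∀ c ∈ a, c ≠ ';') :
    splitSemi (a ++ ';' :: b) = a :: splitSemi b := by
  induction a with
  | nil => simp [splitSemi]
  | cons c a' ih =>
    rw [List.cons_append, splitSemi, if_neg (h c (by simp))]
    rw [ih (fun x hx => h x (by simp [hx]))]
    simp

/-- Main invariant lemma: the scan agrees with first-part-of-split of the normalized rest. -/
lemma scan_eq (fb : List Char) (l tok : List Char)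
    (htok : ∀ c ∈ tok, isSep c = false)
    (hinv : ∀ t₁ t₂, t₂ ≠ [] → tok.reverse = t₁ ++ t₂ → ¬ patAnd <+: (t₂ ++ l)) :
    scanB fb l tok = firstA (splitSemi (tok.reverse ++ repAnd (l.map subf))) fb := by
  have htokr : ∀ c ∈ tok.reverse, isSep c = false := fun c hc => htok c (by simpa using hc)
  have htoksemi : ∀ c ∈ tok.reverse, c ≠ ';' := by
    intro c hc he; have := htokr c hc; rw [he] at this; simp [isSep] at this
  match l with
  | [] =>
    rw [scanB]
    rw [show ([] : List Char).map subf = [] from rfl, repAnd_nil,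
      List.append_nil, splitSemi_no_semi htoksemi, firstA]
    by_cases ht : PySem.Chars.strip tok.reverse = []
    · rw [if_pos ht, if_pos ht, firstA]
    · rw [if_neg ht, if_neg ht]
  | c :: rest =>
    by_cases hp : patAnd.isPrefixOf (c :: rest)
    · -- " and " starts here
      have hshape : ∃ r5, c :: rest = patAnd ++ r5 ∧ r5 = rest.drop 4 := by
        rw [List.isPrefixOf_iff_prefix] at hp
        obtain ⟨r5, hr⟩ := hp
        exact ⟨r5, hr.symm, by
          have := congrArg (List.drop 5) hr
          simpa [patAnd] using this⟩
      obtain ⟨r5, hr, hr5⟩ := hshape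
      subst hr5
      have hp' : [' ', 'a', 'n', 'd', ' '].isPrefixOf (c :: rest) = true := hp
      rw [scanB, if_pos hp']
      have hmap : (c :: rest).map subf = patAnd ++ (rest.drop 4).map subf := by
        rw [hr, List.map_append]
        congr 1
      have hrep : repAnd ((c :: rest).map subf) = ';' :: repAnd ((rest.drop 4).map subf) := by
        rw [hmap]
        have : patAnd ++ (rest.drop 4).map subf
            = ' ' :: ('a' :: 'n' :: 'd' :: ' ' :: (rest.drop 4).map subf) := rfl
        rw [this, repAnd, if_pos (by simp [patAnd, List.isPrefixOf])]
        simp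
      rw [hrep, splitSemi_append_semi _ htoksemi, firstA]
      by_cases ht : PySem.Chars.strip tok.reverse = []
      · rw [if_pos ht, if_pos ht]
        exact scan_eq fb (rest.drop 4) [] (by simp) (inv_nil (rest.drop 4))
      · rw [if_neg ht, if_neg ht]
    · have hp' : ¬ [' ', 'a', 'n', 'd', ' '].isPrefixOf (c :: rest) = true := hp
      rw [scanB, if_neg hp']
      by_cases hc : c = ';' ∨ c = ',' ∨ c = '/' ∨ c = '&' ∨ c = '|'
      · -- single-char separator
        rw [if_pos hc]
        have hsep : isSep c = true := by
          rcases hc with h | h | h | h | h <;> simp [isSep, h]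
        have hmap : (c :: rest).map subf = ';' :: rest.map subf := by
          simp [subf, hsep]
        have hrep : repAnd ((c :: rest).map subf) = ';' :: repAnd (rest.map subf) := by
          rw [hmap, repAnd, if_neg (by simp [patAnd, List.isPrefixOf])]
        rw [hrep, splitSemi_append_semi _ htoksemi, firstA]
        by_cases ht : PySem.Chars.strip tok.reverse = []
        · rw [if_pos ht, if_pos ht]
          exact scan_eq fb rest [] (by simp) (inv_nil rest)
        · rw [if_neg ht, if_neg ht]
      · -- ordinary character
        rw [if_neg hc]
        have hsep : isSep c = false := by
          simp only [isSep, Bool.or_eq_false_iff, decide_eq_false_iff_not]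
          tauto
        have hmap : (c :: rest).map subf = c :: rest.map subf := by
          simp [subf, hsep]
        have hnp2 : ¬ patAnd <+: (c :: rest.map subf) := by
          intro hcontra
          apply hp
          rw [List.isPrefixOf_iff_prefix]
          have : (c :: rest).map subf = c :: rest.map subf := hmap
          rw [← this] at hcontra
          exact (pat_prefix_map (c :: rest)).mp hcontra
        have hrep : repAnd ((c :: rest).map subf) = c :: repAnd (rest.map subf) := by
          rw [hmap, repAnd, if_neg (by simp only [List.isPrefixOf_iff_prefix]; exact hnp2)]
        rw [hrep]
        have hres := scan_eq fb rest (c :: tok)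
          (by intro x hx
              rcases List.mem_cons.mp hx with h | h
              · rw [h]; exact hsep
              · exact htok x h)
          (by intro t₁ t₂ ht2 heq
              have heq' : tok.reverse ++ [c] = t₁ ++ t₂ := by simpa using heq
              -- split t₂ = t₂' ++ [c]
              obtain ⟨t₂', rfl⟩ : ∃ t₂', t₂ = t₂' ++ [c] := by
                have hlast : t₂ = t₂.dropLast ++ [t₂.getLast ht2] := (List.dropLast_append_getLast ht2).symm
                have : (t₁ ++ t₂.dropLast) ++ [t₂.getLast ht2] = tok.reverse ++ [c] := by
                  rw [List.append_assoc, ← hlast]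
                  exact heq'.symm
                have hc' : t₂.getLast ht2 = c := by
                  have := congrArg (fun z => z.getLast? ) this
                  simpa using this
                exact ⟨t₂.dropLast, by rw [← hc']; exact hlast⟩
              have hdec : tok.reverse = t₁ ++ t₂' := by
                have : (t₁ ++ t₂') ++ [c] = tok.reverse ++ [c] := by
                  rw [List.append_assoc]; exact heq'.symm
                exact (List.append_cancel_right this).symm
              rcases List.eq_nil_or_concat t₂' with h0 | _
              · subst h0
                simp only [List.nil_append] at *
                intro hcontra
                apply hp
                rw [List.isPrefixOf_iff_prefix]
                simpa using hcontra
              · have := hinv t₁ t₂' (by rintro rfl; simp_all) hdec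
                intro hcontra
                apply this
                simpa using hcontra)
        rw [hres]
        simp
termination_by l.length
decreasing_by
  all_goals simp

-- the list-level equality behind the verdict
lemma core_eq (l : List Char) :
    firstA (PySem.Chars.splitOn
        ([[';'], [','], ['/'], ['&'], ['|'], [' ', 'a', 'n', 'd', ' ']].foldl
          (fun s sep => PySem.Chars.replace s sep [';']) l) [';'])
      (PySem.Chars.strip l)
    = scanB (PySem.Chars.strip l) l [] := by
  simp only [List.foldl]
  rw [replace_single', replace_single', replace_single', replace_single', replace_single']
  rw [show ([' ', 'a', 'n', 'd', ' '] : List Char) = patAnd from rfl, replace_and']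
  rw [List.map_map, List.map_map, List.map_map, List.map_map]
  have hcomp : l.map
      ((((((fun x => if x = '|' then ';' else x) ∘ fun x => if x = '&' then ';' else x) ∘
        fun x => if x = '/' then ';' else x) ∘ fun x => if x = ',' then ';' else x) ∘
        fun x => if x = ';' then ';' else x)) = l.map subf := by
    apply List.map_congr_left
    intro c _
    simp only [Function.comp, subf, isSep]
    split_ifs <;> simp_all
  rw [hcomp, splitOn_eq]
  rw [scan_eq (PySem.Chars.strip l) l [] (by simp) (inv_nil l)]
  simp

-- ===== VERDICT (by name: the statement is the Claim_ definition above) =====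
theorem clean_artist_name_spec : Claim_equal_clean_artist_name := by
  intro artist _
  unfold Spec_clean_artist_name clean_artist_name clean_artist_name_alt
  by_cases h : artist = ""
  · rw [if_pos h, if_pos h]
  · rw [if_neg h, if_neg h]
    exact congrArg String.ofList (core_eq artist.toList)
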